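-- pv_equiv track=rewrite | github.com/tamil-phy/tamil_tokenizer | tamil_tokenizer/utils/recursive_algorithm.py | cartesian_with_limit
-- ===== SOURCE A (Python) =====
-- from typing import List, TypeVar, Iterator
-- from itertools import product
--
-- T = TypeVar('T')
--
-- def cartesian_with_limit(lists: List[List[T]], limit: int) -> List[List[T]]:
--     """
--     Compute cartesian product with a limit on results.
--
--     Used for performance reasons when the full cartesian product
--     would be too large.
--
--     Args:
--         lists: List of lists
--         limit: Maximum number of results to return
--
--     Returns:
--         Up to 'limit' combinations
--     """
--     if not lists:
--         return [[]]
--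
--     result = []
--     for combo in product(*lists):
--         result.append(list(combo))
--         if len(result) >= limit:
--             break
--
--     return result
-- ===== SOURCE B (Python) =====
-- def cartesian_with_limit(lists, limit):
--     # Columnar (mixed-radix) construction: build each position's column as a
--     # periodic repetition of its list, truncate all columns to the number of
--     # combos wanted, and zip them into rows.
--     if limit <= 0:
--         return []
--     if not lists:
--         return [[]]
--     total = 1
--     for lst in lists:
--         total *= len(lst)
--     count = min(limit, total)
--     if count == 0:
--         return []
--     cols = []
--     rep = 1
--     for lst in reversed(lists):
--         if rep >= count:
--             col = [lst[0]] * count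
--         else:
--             block = []
--             for x in lst:
--                 block.extend([x] * rep)
--             cycles = (count + len(block) - 1) // len(block)
--             col = (block * cycles)[:count]
--         cols.append(col)
--         rep *= len(lst)
--     cols.reverse()
--     return [list(row) for row in zip(*cols)]
-- ===== Notes on version B (the rewrite author's own statement) =====
-- stated objective: alternative
-- what changed: Replaces iteration over itertools.product with a columnar mixed-radix construction: each position's column is built as a truncated periodic repetition of its list and the columns are zipped into rows.
-- intended difference: When limit <= 0 and every sub-list is nonempty (so the product is nonempty), A still returns one combination because it appends before checking the limit, while B returns the empty list, which is the intended meaning of 'at most limit results'. — e.g. on cartesian_with_limit([[1]], 0): A returns [[1]], B returns []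
import Mathlib
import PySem

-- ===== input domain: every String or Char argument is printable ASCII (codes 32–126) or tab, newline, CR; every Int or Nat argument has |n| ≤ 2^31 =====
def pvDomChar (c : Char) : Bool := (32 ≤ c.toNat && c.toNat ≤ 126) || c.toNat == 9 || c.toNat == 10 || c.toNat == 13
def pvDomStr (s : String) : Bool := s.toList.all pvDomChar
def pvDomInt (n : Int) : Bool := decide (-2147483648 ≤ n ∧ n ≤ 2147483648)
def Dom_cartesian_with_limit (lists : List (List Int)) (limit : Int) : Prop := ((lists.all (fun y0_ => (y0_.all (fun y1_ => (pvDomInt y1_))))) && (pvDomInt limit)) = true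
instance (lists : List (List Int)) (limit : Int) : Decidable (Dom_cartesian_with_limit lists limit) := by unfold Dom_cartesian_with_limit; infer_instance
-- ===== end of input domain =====

-- B replaces iteration over itertools.product by a columnar (mixed-radix) construction:
-- each position's column is a periodic repetition of its list, truncated to the number
-- of combos wanted, and the columns are zipped into rows (alternative algorithm).

-- ===== PORT A =====
-- itertools.product(*lists): the full product, rightmost varies fastest
def pyProduct (lists : List (List Int)) : List (List Int) :=
  match lists with
  | [] => [[]]
  | h :: t => h.flatMap (fun x => (pyProduct t).map (fun c => x :: c))

-- the 'for combo in product(*lists): append; if len(result) >= limit: break' loop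
def aLoop (combos : List (List Int)) (limit : Int) (result : List (List Int)) : List (List Int) :=
  match combos with
  | [] => result
  | c :: rest =>
    let result' := result ++ [c]
    if (result'.length : Int) ≥ limit then result'
    else aLoop rest limit result'

def cartesian_with_limit (lists : List (List Int)) (limit : Int) : List (List Int) :=
  if lists = [] then [[]]
  else aLoop (pyProduct lists) limit []

-- ===== PORT B =====
-- 'block = []; for x in lst: block.extend([x] * rep)'
def blockOf (lst : List Int) (rep : Int) : List Int :=
  lst.flatMap (fun x => List.replicate rep.toNat x)

-- 'for lst in reversed(lists): … cols.append(col); rep *= len(lst)'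
def colsLoop (rev : List (List Int)) (count : Int) (cols : List (List Int)) (rep : Int) : List (List Int) :=
  match rev with
  | [] => cols
  | lst :: rest =>
    let col :=
      if rep ≥ count then
        -- '[lst[0]] * count' (lst is nonempty on every executed path: count ≥ 1)
        List.replicate count.toNat ((PySem.List.pyGet? lst 0).getD 0)
      else
        let block := blockOf lst rep
        let cycles := PySem.Int.floordiv (count + (block.length : Int) - 1) (block.length : Int)
        (List.flatten (List.replicate cycles.toNat block)).take count.toNat
    colsLoop rest count (cols ++ [col]) (rep * (lst.length : Int))

-- hand port of '[list(row) for row in zip(*cols)]': exact — zip stops at the shortest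
-- column, and indexing below that length never misses; zip() of no columns is empty,
-- matched by the [] branch (unreachable here since lists ≠ [] is guarded)
def zipStar (cols : List (List Int)) : List (List Int) :=
  match cols with
  | [] => []
  | c :: rest =>
    (List.range (rest.foldl (fun m l => min m l.length) c.length)).map
      (fun j => (c :: rest).map (fun col => (col[j]?).getD 0))

def cartesian_with_limit_alt (lists : List (List Int)) (limit : Int) : List (List Int) :=
  if limit ≤ 0 then []
  else if lists = [] then [[]]
  else
    let total := lists.foldl (fun a l => a * (l.length : Int)) 1
    let count := min limit total
    if count = 0 then []
    else zipStar ((colsLoop lists.reverse count [] 1).reverse)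

-- ===== PRECONDITION & SPEC =====
-- When limit ≤ 0 and every sub-list is nonempty (so the product is nonempty), A still
-- returns one combination because it appends before checking the limit, while B returns
-- the empty list, which is the intended meaning of "at most limit results".
def D_cartesian_with_limit (lists : List (List Int)) (limit : Int) : Prop :=
  limit ≤ 0 ∧ ∀ l ∈ lists, l ≠ []
instance (lists : List (List Int)) (limit : Int) : Decidable (D_cartesian_with_limit lists limit) := by unfold D_cartesian_with_limit; infer_instance

def Spec_cartesian_with_limit (lists : List (List Int)) (limit : Int) (out : List (List Int)) : Prop := ¬ D_cartesian_with_limit lists limit → out = cartesian_with_limit_alt lists limit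
instance (lists : List (List Int)) (limit : Int) (out : List (List Int)) : Decidable (Spec_cartesian_with_limit lists limit out) := by unfold Spec_cartesian_with_limit; infer_instance

def pvDiffWitness_cartesian_with_limit : List (List Int) × Int := ([[1]], 0)
def pvDiffWitnessOut_cartesian_with_limit : (List (List Int)) × (List (List Int)) := ([[1]], [])

-- ===== CLAIM (what is proved, stated in full; the proofs are below) =====
def Claim_unchanged_cartesian_with_limit : Prop := ∀ (lists : List (List Int)) (limit : Int), Dom_cartesian_with_limit lists limit → Spec_cartesian_with_limit lists limit (cartesian_with_limit lists limit)
def Claim_changed_cartesian_with_limit : Prop := Dom_cartesian_with_limit (pvDiffWitness_cartesian_with_limit.1) (pvDiffWitness_cartesian_with_limit.2) ∧ D_cartesian_with_limit (pvDiffWitness_cartesian_with_limit.1) (pvDiffWitness_cartesian_with_limit.2) ∧ cartesian_with_limit (pvDiffWitness_cartesian_with_limit.1) (pvDiffWitness_cartesian_with_limit.2) = pvDiffWitnessOut_cartesian_with_limit.1 ∧ cartesian_with_limit_alt (pvDiffWitness_cartesian_with_limit.1) (pvDiffWitness_cartesian_with_limit.2) = pvDiffWitnessOut_cartesian_with_limit.2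 ∧ pvDiffWitnessOut_cartesian_with_limit.1 ≠ pvDiffWitnessOut_cartesian_with_limit.2
def Claim_exact_cartesian_with_limit : Prop := ∀ (lists : List (List Int)) (limit : Int), Dom_cartesian_with_limit lists limit → D_cartesian_with_limit lists limit → cartesian_with_limit lists limit ≠ cartesian_with_limit_alt lists limit

-- ===== LEMMAS AND PROOFS =====

-- number of combos in the full product
def NL (lists : List (List Int)) : Nat := (lists.map List.length).prod

-- first c entries of the periodic extension of b (c copies always suffice when b ≠ [])
def cyc {α : Type} (b : List α) (c : Nat) : List α := (List.flatten (List.replicate c b)).take c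

def blockN (lst : List Int) (r : Nat) : List Int := lst.flatMap (fun x => List.replicate r x)

def colN (lst : List Int) (r c : Nat) : List Int := cyc (blockN lst r) c

-- the column list B builds, in left-to-right order, with an outer repetition factor r
def colsLr (lists : List (List Int)) (c r : Nat) : List (List Int) :=
  match lists with
  | [] => []
  | h :: t => colN h (r * NL t) c :: colsLr t c r

def rowsSpec (cols : List (List Int)) (c : Nat) : List (List Int) :=
  (List.range c).map (fun j => cols.map (fun col => (col[j]?).getD 0))

theorem length_pyProduct (lists : List (List Int)) : (pyProduct lists).length = NL lists := by
  induction lists with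
  | nil => simp [pyProduct, NL]
  | cons h t ih =>
    rw [pyProduct, NL, List.map_cons, List.prod_cons, List.length_flatMap]
    simp [ih]
    simp [NL, List.map_const', mul_comm]

theorem blockN_length (lst : List Int) (r : Nat) : (blockN lst r).length = lst.length * r := by
  simp [blockN, List.length_flatMap, List.map_const', mul_comm]

theorem NL_pos (lists : List (List Int)) (hne : ∀ l ∈ lists, l ≠ []) : 1 ≤ NL lists := by
  rw [Nat.one_le_iff_ne_zero]
  intro h0
  have hm : (0:Nat) ∈ lists.map List.length := List.prod_eq_zero_iff.mp h0
  rcases List.mem_map.mp hm with ⟨l, hl, hl0⟩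
  exact hne l hl (List.length_eq_zero_iff.mp hl0)

theorem ne_nil_of_NL_pos (lists : List (List Int)) (h : NL lists ≠ 0) : ∀ l ∈ lists, l ≠ [] := by
  intro l hl hnil
  apply h
  apply List.prod_eq_zero_iff.mpr
  exact List.mem_map.mpr ⟨l, hl, by simp [hnil]⟩

theorem flatten_replicate_succ {α : Type} (b : List α) (m : Nat) :
    List.flatten (List.replicate (m+1) b) = List.flatten (List.replicate m b) ++ b := by
  rw [List.replicate_succ', List.flatten_append]; simp

theorem length_flatten_replicate {α : Type} (b : List α) (m : Nat) :
    (List.flatten (List.replicate m b)).length = m * b.length := by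
  induction m with
  | zero => simp
  | succ m ih => rw [flatten_replicate_succ]; simp [ih]; ring

theorem take_flatten_replicate_add {α : Type} (b : List α) (c m j : Nat) (h : c ≤ m * b.length) :
    (List.flatten (List.replicate (m + j) b)).take c = (List.flatten (List.replicate m b)).take c := by
  induction j with
  | zero => rfl
  | succ j ih =>
    rw [show m + (j+1) = (m + j) + 1 by omega, flatten_replicate_succ,
        List.take_append_of_le_length (by rw [length_flatten_replicate]; nlinarith), ih]

-- any number of copies ≥ the needed length gives the same truncation
theorem cyc_stable {α : Type} (b : List α) (c m : Nat) (h : c ≤ m * b.length) :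
    (List.flatten (List.replicate m b)).take c = cyc b c := by
  unfold cyc
  by_cases hm : m ≤ c
  · have hx := take_flatten_replicate_add b c m (c-m) h
    rw [show m + (c-m) = c from by omega] at hx
    exact hx.symm
  · by_cases hb : b.length = 0
    · have : c = 0 := by nlinarith
      simp [this]
    · have hx := take_flatten_replicate_add b c c (m-c) (Nat.le_mul_of_pos_right c (by omega))
      rw [show c + (m-c) = m from by omega] at hx
      exact hx

-- c copies is always enough when the remaining goal is a c-prefix
theorem cyc_prefix {α : Type} (b : List α) (c : Nat) (h : c ≤ b.length) :
    cyc b c = b.take c := by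
  rcases Nat.eq_zero_or_pos c with rfl | hc
  · simp [cyc]
  · unfold cyc
    rw [show c = (c-1)+1 by omega, List.replicate_succ, List.flatten_cons,
        show (c-1)+1 = c by omega, List.take_append_of_le_length h]

theorem flatten_replicate_mul {α : Type} (b : List α) (m n : Nat) :
    List.flatten (List.replicate m (List.flatten (List.replicate n b))) = List.flatten (List.replicate (m*n) b) := by
  induction m with
  | zero => simp
  | succ m ih =>
    rw [List.replicate_succ, List.flatten_cons, ih, show (m+1)*n = n + m*n by ring,
        List.replicate_add, List.flatten_append]

theorem map_cons_eq_zipWith (x : Int) (P : List (List Int)) :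
    P.map (fun c => x :: c) = List.zipWith List.cons (List.replicate P.length x) P := by
  induction P with
  | nil => simp
  | cons p P ih => simp [List.replicate_succ, ih]

-- one period of the product = cons zipped over the head column block and the cycled tail product
theorem period_zip (h : List Int) (P : List (List Int)) :
    h.flatMap (fun x => P.map (fun c => x :: c))
      = List.zipWith List.cons (blockN h P.length) (List.flatten (List.replicate h.length P)) := by
  induction h with
  | nil => simp [blockN]
  | cons x xs ih =>
    rw [List.flatMap_cons, ih, map_cons_eq_zipWith]
    have hb : blockN (x :: xs) P.length = List.replicate P.length x ++ blockN xs P.length := by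
      simp [blockN]
    rw [hb, List.length_cons, List.replicate_succ, List.flatten_cons,
        List.zipWith_append (by simp)]

theorem flatten_replicate_zipWith (c : Nat) (X : List Int) (Y : List (List Int)) (h : X.length = Y.length) :
    List.flatten (List.replicate c (List.zipWith List.cons X Y))
      = List.zipWith List.cons (List.flatten (List.replicate c X)) (List.flatten (List.replicate c Y)) := by
  induction c with
  | zero => simp
  | succ c ih =>
    simp only [List.replicate_succ, List.flatten_cons, ih]
    rw [List.zipWith_append h]

theorem map_range_cons (c : Nat) (f : Nat → Int) (g : Nat → List Int) :
    (List.range c).map (fun j => f j :: g j)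
      = List.zipWith List.cons ((List.range c).map f) ((List.range c).map g) := by
  apply List.ext_getElem
  · simp
  · intro j h1 h2
    simp

theorem map_range_getD (col : List Int) (c : Nat) (h : col.length = c) :
    (List.range c).map (fun j => (col[j]?).getD 0) = col := by
  apply List.ext_getElem
  · simp [h]
  · intro j h1 h2
    simp at h1
    simp [List.getElem?_eq_getElem (by omega : j < col.length)]

theorem colN_length (lst : List Int) (r c : Nat) (hne : lst ≠ []) (hr : 1 ≤ r) :
    (colN lst r c).length = c := by
  have hb : 1 ≤ (blockN lst r).length := by
    rw [blockN_length]
    have : 1 ≤ lst.length := List.length_pos_iff.mpr hne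
    nlinarith
  simp [colN, cyc, length_flatten_replicate]
  nlinarith

theorem rowsSpec_nil (c : Nat) : rowsSpec [] c = List.replicate c [] := by
  simp [rowsSpec, List.map_const']

theorem flatten_replicate_singleton {α : Type} (a : α) (c : Nat) :
    List.flatten (List.replicate c [a]) = List.replicate c a := by
  induction c with
  | zero => simp
  | succ c ih => simp [List.replicate_succ, ih]

-- MAIN: the zipped columns are the truncated periodic extension of the product
theorem rows_eq_cyc (lists : List (List Int)) (c : Nat) (hne : ∀ l ∈ lists, l ≠ []) :
    rowsSpec (colsLr lists c 1) c = cyc (pyProduct lists) c := by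
  induction lists with
  | nil =>
    rw [colsLr, rowsSpec_nil, pyProduct, cyc, flatten_replicate_singleton, List.take_replicate,
        min_self]
  | cons h t ih =>
    have hh : h ≠ [] := hne h (by simp)
    have ht : ∀ l ∈ t, l ≠ [] := fun l hl => hne l (by simp [hl])
    have hP1 : 1 ≤ (pyProduct t).length := by
      rw [length_pyProduct]; exact NL_pos t ht
    have hNt : NL t = (pyProduct t).length := (length_pyProduct t).symm
    have hh1 : 1 ≤ h.length := List.length_pos_iff.mpr hh
    rw [colsLr]
    have hcolfun : rowsSpec (colN h (1 * NL t) c :: colsLr t c 1) c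
        = List.zipWith List.cons ((List.range c).map (fun j => ((colN h (1 * NL t) c)[j]?).getD 0))
            (rowsSpec (colsLr t c 1) c) := by
      unfold rowsSpec
      rw [← map_range_cons]
      rfl
    rw [hcolfun, map_range_getD _ _ (colN_length _ _ _ hh (by omega)), ih ht, one_mul]
    rw [pyProduct, period_zip, hNt]
    unfold cyc
    rw [flatten_replicate_zipWith _ _ _ (by rw [blockN_length, length_flatten_replicate]),
        List.take_zipWith, flatten_replicate_mul]
    congr 1
    rw [cyc_stable _ c c (Nat.le_mul_of_pos_right c (by omega)),
       cyc_stable _ c (c*h.length) (Nat.le_trans (Nat.le_mul_of_pos_right c (by omega))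
         (Nat.le_mul_of_pos_right _ (by omega)))]

-- accumulator lemma for B's column loop
theorem colsLoop_acc (count : Int) : ∀ (rev cols : List (List Int)) (rep : Int),
    colsLoop rev count cols rep = cols ++ colsLoop rev count [] rep := by
  intro rev
  induction rev with
  | nil => intro cols rep; simp [colsLoop]
  | cons lst rest ih =>
    intro cols rep
    simp only [colsLoop]
    rw [ih (cols ++ _), ih ([] ++ _)]
    simp

-- the col computed for one lst collapses to the normal form colN
theorem colStep_eq_colN (lst : List Int) (rep : Int) (c : Nat)
    (hlst : lst ≠ []) (hrep : 1 ≤ rep) (hc : 1 ≤ c) :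
    (if rep ≥ (c:Int) then
        List.replicate ((c:Int)).toNat ((PySem.List.pyGet? lst 0).getD 0)
      else
        (List.flatten (List.replicate (PySem.Int.floordiv ((c:Int) + ((blockOf lst rep).length : Int) - 1)
            ((blockOf lst rep).length : Int)).toNat (blockOf lst rep))).take ((c:Int)).toNat)
      = colN lst rep.toNat c := by
  have hblock : blockOf lst rep = blockN lst rep.toNat := rfl
  have hlen1 : 1 ≤ lst.length := List.length_pos_iff.mpr hlst
  have hrn : 1 ≤ rep.toNat := by omega
  have hbl : 1 ≤ (blockN lst rep.toNat).length := by
    rw [blockN_length]; nlinarith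
  by_cases hge : rep ≥ (c:Int)
  · rw [if_pos hge, Int.toNat_natCast]
    rcases lst with _ | ⟨x, xs⟩
    · exact absurd rfl hlst
    have hcr : c ≤ rep.toNat := by omega
    have hbxx : blockN (x :: xs) rep.toNat = List.replicate rep.toNat x ++ blockN xs rep.toNat := by
      simp [blockN]
    have hlb : c ≤ (blockN (x :: xs) rep.toNat).length := by
      rw [blockN_length]; nlinarith
    have : colN (x :: xs) rep.toNat c = List.replicate c x := by
      rw [colN, cyc_prefix _ _ hlb, hbxx,
          List.take_append_of_le_length (by simp [hcr]), List.take_replicate,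
          Nat.min_eq_left hcr]
    rw [this]
    simp [PySem.List.pyGet?, PySem.List.pyIdx?]
  · rw [if_neg hge, hblock, Int.toNat_natCast]
    set L := ((blockN lst rep.toNat).length : Int) with hL
    have hLpos : 0 < L := by rw [hL]; exact_mod_cast hbl
    set e := PySem.Int.floordiv ((c:Int) + L - 1) L with he
    have hediv : e = ((c:Int) + L - 1) / L := he.trans (PySem.Int.floordiv_eq_ediv_of_pos hLpos)
    have hdm := Int.ediv_add_emod ((c:Int) + L - 1) L
    have hm1 := Int.emod_nonneg ((c:Int) + L - 1) (by omega : L ≠ 0)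
    have hm2 := Int.emod_lt_of_pos ((c:Int) + L - 1) hLpos
    have hLe : (c:Int) ≤ L * e := by rw [hediv]; linarith
    have hepos : 0 < e := by nlinarith
    have hcast : ((e.toNat * (blockN lst rep.toNat).length : Nat) : Int) = L * e := by
      push_cast [Int.toNat_of_nonneg hepos.le]; ring
    have hcov : c ≤ e.toNat * (blockN lst rep.toNat).length := by
      have : ((c:Nat) : Int) ≤ ((e.toNat * (blockN lst rep.toNat).length : Nat) : Int) := by
        rw [hcast]; exact hLe
      exact_mod_cast this
    exact cyc_stable _ _ _ hcov

-- processing one trailing element of the reversed list appends one column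
theorem colsLoop_snoc (count : Int) : ∀ (xs : List (List Int)) (y : List Int) (rep : Int),
    colsLoop (xs ++ [y]) count [] rep
      = colsLoop xs count [] rep ++ colsLoop [y] count [] (rep * (NL xs : Int)) := by
  intro xs
  induction xs with
  | nil => intro y rep; simp [colsLoop, NL]
  | cons x xs' ih =>
    intro y rep
    simp only [List.cons_append, colsLoop]
    rw [colsLoop_acc count (xs' ++ [y]), ih, colsLoop_acc count xs']
    have : rep * (x.length : Int) * (NL xs' : Int) = rep * (NL (x :: xs') : Int) := by
      simp [NL]
      push_cast
      ring
    rw [this]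
    conv_rhs => rw [colsLoop_acc]
    simp [colsLoop]

-- cols loop over the reversed lists, flushed into normal form (left order after reverse)
theorem colsLoop_reverse_eq (c : Nat) (hc : 1 ≤ c) : ∀ (lists : List (List Int)) (rep : Int),
    (∀ l ∈ lists, l ≠ []) → 1 ≤ rep →
    (colsLoop lists.reverse (c:Int) [] rep).reverse = colsLr lists c rep.toNat := by
  intro lists
  induction lists with
  | nil => intro rep _ _; simp [colsLoop, colsLr]
  | cons h t ih =>
    intro rep hne hrep
    have hh : h ≠ [] := hne h (by simp)
    have ht : ∀ l ∈ t, l ≠ [] := fun l hl => hne l (by simp [hl])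
    have hNt : 1 ≤ NL t := NL_pos t ht
    rw [List.reverse_cons, colsLoop_snoc, List.reverse_append, ih rep ht hrep]
    have hNtr : NL t.reverse = NL t := by
      simp [NL, List.map_reverse]
    rw [hNtr]
    have hthe : colsLoop [h] (c:Int) [] (rep * (NL t : Int))
        = [colN h ((rep * (NL t : Int))).toNat c] := by
      simp only [colsLoop]
      rw [colStep_eq_colN h (rep * (NL t : Int)) c hh (by nlinarith) hc]
      simp
    rw [hthe]
    have : ((rep * (NL t : Int))).toNat = rep.toNat * NL t := by
      rw [show rep * (NL t : Int) = ((rep.toNat * NL t : Nat) : Int) by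
            push_cast [Int.toNat_of_nonneg (by omega : (0:Int) ≤ rep)]; ring,
          Int.toNat_natCast]
    rw [this]
    rfl

theorem foldl_min_const (c : Nat) : ∀ (L : List (List Int)), (∀ l ∈ L, l.length = c) →
    L.foldl (fun m l => min m l.length) c = c := by
  intro L
  induction L with
  | nil => intro _; rfl
  | cons l L ih =>
    intro h
    simp only [List.foldl_cons, h l (by simp), min_self]
    exact ih fun x hx => h x (by simp [hx])

theorem colsLr_lengths (lists : List (List Int)) (c r : Nat) (hne : ∀ l ∈ lists, l ≠ []) (hr : 1 ≤ r) :
    ∀ col ∈ colsLr lists c r, col.length = c := by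
  induction lists with
  | nil => simp [colsLr]
  | cons h t ih =>
    intro col hcol
    rw [colsLr] at hcol
    rcases List.mem_cons.mp hcol with rfl | hcol
    · exact colN_length _ _ _ (hne h (by simp)) (by
        have := NL_pos t (fun l hl => hne l (by simp [hl]))
        nlinarith)
    · exact ih (fun l hl => hne l (by simp [hl])) col hcol

theorem zipStar_eq_rowsSpec (cols : List (List Int)) (c : Nat)
    (hcols : ∀ col ∈ cols, col.length = c) (hne : cols ≠ []) :
    zipStar cols = rowsSpec cols c := by
  rcases cols with _ | ⟨col, rest⟩
  · exact absurd rfl hne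
  · have hz : zipStar (col :: rest)
        = (List.range (rest.foldl (fun m l => min m l.length) col.length)).map
            (fun j => (col :: rest).map (fun cc => (cc[j]?).getD 0)) := rfl
    rw [hz, hcols col (by simp), foldl_min_const c rest (fun l hl => hcols l (by simp [hl]))]
    rfl

theorem foldl_mul_eq : ∀ (lists : List (List Int)) (a : Int),
    lists.foldl (fun a l => a * ((l.length : Nat) : Int)) a = a * (NL lists : Int) := by
  intro lists
  induction lists with
  | nil => intro a; simp [NL]
  | cons h t ih =>
    intro a
    rw [List.foldl_cons, ih]
    simp [NL]
    push_cast
    ring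

-- B computes the limit-prefix of the product when limit ≥ 1
theorem altB_eq (lists : List (List Int)) (limit : Int) (h1 : 1 ≤ limit) :
    cartesian_with_limit_alt lists limit = (pyProduct lists).take limit.toNat := by
  simp only [cartesian_with_limit_alt, if_neg (by omega : ¬ limit ≤ 0)]
  by_cases hnil : lists = []
  · rw [if_pos hnil, hnil]
    rw [List.take_of_length_le (by simp [pyProduct]; omega)]
    rfl
  · rw [if_neg hnil]
    rw [foldl_mul_eq, one_mul]
    by_cases h0 : NL lists = 0
    · rw [h0]
      have hc0 : (min limit ((0:Nat):Int)) = 0 := by push_cast; omega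
      rw [hc0, if_pos rfl]
      have : pyProduct lists = [] :=
        List.eq_nil_of_length_eq_zero (by rw [length_pyProduct, h0])
      rw [this, List.take_nil]
    · have hN1 : 1 ≤ NL lists := by omega
      have hne : ∀ l ∈ lists, l ≠ [] := ne_nil_of_NL_pos lists h0
      set count := min limit ((NL lists : Nat) : Int) with hcount
      have hc1 : 1 ≤ count := by rw [hcount]; rcases min_cases limit ((NL lists : Nat) : Int) with ⟨h,_⟩|⟨h,_⟩ <;> omega
      have hcne : ¬ (count = 0) := by omega
      rw [if_neg hcne]
      set c := count.toNat with hcdef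
      have hcc : count = ((c : Nat) : Int) := by omega
      rw [hcc]
      rw [colsLoop_reverse_eq c (by omega) lists 1 hne (by omega)]
      have h1t : (1:Int).toNat = 1 := rfl
      rw [h1t]
      rw [zipStar_eq_rowsSpec _ c (colsLr_lengths lists c 1 hne (by omega)) (by
        rcases lists with _ | ⟨h, t⟩
        · exact absurd rfl hnil
        · simp [colsLr])]
      rw [rows_eq_cyc lists c hne]
      have hcle : c ≤ (pyProduct lists).length := by
        rw [length_pyProduct]
        rw [hcount] at hcdef
        rcases min_cases limit ((NL lists : Nat) : Int) with ⟨h,_⟩|⟨h,_⟩ <;> omega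
      rw [cyc_prefix _ _ hcle]
      have : c = min limit.toNat (pyProduct lists).length := by
        rw [length_pyProduct]
        rw [hcount] at hcdef
        rcases min_cases limit ((NL lists : Nat) : Int) with ⟨h,h'⟩|⟨h,h'⟩ <;> omega
      rw [this, ← List.take_take, List.take_length]

theorem aLoop_eq (limit : Int) : ∀ (combos res : List (List Int)),
    aLoop combos limit res = res ++ combos.take (max (limit - res.length) 1).toNat := by
  intro combos
  induction combos with
  | nil => intro res; simp [aLoop]
  | cons c rest ih =>
    intro res
    simp only [aLoop]
    by_cases h : (((res ++ [c]).length : Nat) : Int) ≥ limit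
    · rw [if_pos h]
      have ht : (max (limit - res.length) 1).toNat = 1 := by
        simp only [List.length_append, List.length_cons, List.length_nil] at h
        push_cast at h ⊢
        omega
      simp [ht]
    · rw [if_neg h]
      rw [ih (res ++ [c])]
      simp only [List.length_append, List.length_cons, List.length_nil] at h
      have h1 : (max (limit - ((res.length : Int) + 1)) 1).toNat = (limit - res.length - 1).toNat := by omega
      have h2 : (max (limit - res.length) 1).toNat = (limit - res.length).toNat := by omega
      have h3 : ((limit - (res.length:Int))).toNat = (limit - res.length - 1).toNat + 1 := by omega
      simp only [List.length_append, List.length_cons, List.length_nil]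
      push_cast
      rw [h1, h2, h3, List.take_succ_cons, List.append_assoc, List.singleton_append]

theorem aEq (lists : List (List Int)) (limit : Int) :
    cartesian_with_limit lists limit = (pyProduct lists).take (max limit 1).toNat := by
  unfold cartesian_with_limit
  by_cases hnil : lists = []
  · rw [if_pos hnil, hnil]
    rw [List.take_of_length_le (by simp [pyProduct])]
    simp [pyProduct]
  · rw [if_neg hnil, aLoop_eq]
    simp

-- ===== VERDICT (by name: the statement is the Claim_ definition above) =====
theorem cartesian_with_limit_spec : Claim_unchanged_cartesian_with_limit := by
  intro lists limit _
  unfold Spec_cartesian_with_limit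
  intro hnd
  by_cases h1 : 1 ≤ limit
  · rw [aEq, altB_eq lists limit h1]
    congr 1
    omega
  · -- limit ≤ 0 and, since ¬D, some sub-list is empty: both sides are []
    have hex : ¬ ∀ l ∈ lists, l ≠ [] := by
      intro hall
      exact hnd ⟨by omega, hall⟩
    have h0 : NL lists = 0 := by
      by_contra h0
      exact hex (ne_nil_of_NL_pos lists h0)
    have hnil : lists ≠ [] := by
      intro h; rw [h] at h0; simp [NL] at h0
    have hP : pyProduct lists = [] :=
      List.eq_nil_of_length_eq_zero (by rw [length_pyProduct, h0])
    rw [aEq, hP, List.take_nil]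
    simp only [cartesian_with_limit_alt, if_pos (by omega : limit ≤ 0)]

theorem cartesian_with_limit_changed : Claim_changed_cartesian_with_limit := by
  unfold Claim_changed_cartesian_with_limit; decide

theorem cartesian_with_limit_tight : Claim_exact_cartesian_with_limit := by
  intro lists limit _ hd
  rcases hd with ⟨hl0, hne⟩
  have hN1 : 1 ≤ NL lists := NL_pos lists hne
  have hPne : pyProduct lists ≠ [] := by
    intro h
    have := length_pyProduct lists
    rw [h] at this
    simp at this
    omega
  rw [aEq]
  simp only [cartesian_with_limit_alt, if_pos (by omega : limit ≤ 0)]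
  have hm : (max limit 1).toNat = 1 := by omega
  rw [hm]
  rcases lists with _ | _ <;> rcases hP : pyProduct _ with _ | ⟨p, ps⟩ <;> simp_all
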